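-- pv_equiv track=rewrite | github.com/kim-jang-hyun/table_rag | table_rag/table/normalizer.py | fill_rowspan_cells
-- ===== SOURCE A (Python) =====
-- from typing import List
--
-- def fill_rowspan_cells(body: List[List[str]]) -> List[List[str]]:
--     """Back-fill empty cells caused by PyMuPDF's rowspan representation.
--
--     PyMuPDF places a rowspan cell's value in the *last* row of the span and
--     leaves earlier rows as empty strings.  This function propagates that value
--     backward to fill the empty slots.
--
--     Example::
--
--         Input:  [["",      "A-1"], ["A계열", "A-2"]]
--         Output: [["A계열", "A-1"], ["A계열", "A-2"]]
--     """
--     if not body: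
--         return body
--     n_cols = max(len(r) for r in body)
--     result = [list(r) + [""] * (n_cols - len(r)) for r in body]
--     n_rows = len(result)
--
--     for col in range(n_cols):
--         i = 0
--         while i < n_rows:
--             if not result[i][col]:
--                 j = i + 1
--                 while j < n_rows and not result[j][col]:
--                     j += 1
--                 if j < n_rows:
--                     for k in range(i, j):
--                         result[k][col] = result[j][col]
--                 i = j + 1
--             else:
--                 i += 1
--     return result
-- ===== SOURCE B (Python) =====
-- from typing import List
--
-- def fill_rowspan_cells(body: List[List[str]]) -> List[List[str]]:
--     """Back-fill empty rowspan cells with a single bottom-up carry per column."""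
--     if not body:
--         return body
--     n_cols = max(len(r) for r in body)
--     carry = [""] * n_cols
--     out = []
--     for r in reversed(body):
--         padded = list(r) + [""] * (n_cols - len(r))
--         filled = [c if c else k for c, k in zip(padded, carry)]
--         out.append(filled)
--         carry = filled
--     return out[::-1]
-- ===== Notes on version B (the rewrite author's own statement) =====
-- stated objective: simpler
-- what changed: A scans each column top-down with a two-pointer search plus an inner fill loop writing into a mutable matrix; B makes one bottom-up pass over the rows, carrying per column the last non-empty value seen below and building each filled row directly.
import Mathlib
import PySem

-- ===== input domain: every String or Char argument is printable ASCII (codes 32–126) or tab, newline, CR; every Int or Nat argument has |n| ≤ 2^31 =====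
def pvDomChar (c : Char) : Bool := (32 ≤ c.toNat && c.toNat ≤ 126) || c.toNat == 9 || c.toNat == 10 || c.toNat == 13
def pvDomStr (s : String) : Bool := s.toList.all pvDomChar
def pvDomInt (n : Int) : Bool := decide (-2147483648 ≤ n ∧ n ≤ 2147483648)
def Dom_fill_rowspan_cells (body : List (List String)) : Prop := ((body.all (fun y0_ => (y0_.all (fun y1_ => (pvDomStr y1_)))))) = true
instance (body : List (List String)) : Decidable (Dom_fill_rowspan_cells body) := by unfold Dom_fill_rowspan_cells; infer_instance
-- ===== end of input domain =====

-- B replaces A's per-column forward two-pointer scan (with an inner fill loop) by one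
-- bottom-up pass per row carrying the last non-empty value of each column (objective: simpler).

-- ===== PORT A =====
-- matrix cell read/write helpers (Python result[i][col] / result[i][col] = v; indices always in range in A)
def pvGetC (m : List (List String)) (i c : Nat) : String := (m.getD i []).getD c ""

def pvSetC (m : List (List String)) (i c : Nat) (v : String) : List (List String) :=
  m.set i ((m.getD i []).set c v)

-- inner `while j < n_rows and not result[j][col]: j += 1`
def pvFindJ (m : List (List String)) (nRows c j : Nat) : Nat :=
  if _h : j < nRows ∧ pvGetC m j c = "" then pvFindJ m nRows c (j + 1) else j
termination_by nRows - j
decreasing_by omega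

-- cited by pvWhile's termination proof
lemma pvFindJ_ge (m : List (List String)) (nRows c j : Nat) : j ≤ pvFindJ m nRows c j := by
  unfold pvFindJ
  split
  · have := pvFindJ_ge m nRows c (j + 1); omega
  · exact Nat.le_refl j
termination_by nRows - j
decreasing_by omega

-- `for k in range(i, j): result[k][col] = result[j][col]`
def pvFill (m : List (List String)) (c i j : Nat) : List (List String) :=
  (List.range' i (j - i)).foldl (fun acc k => pvSetC acc k c (pvGetC acc j c)) m

-- outer `while i < n_rows: …`
def pvWhile (m : List (List String)) (nRows c i : Nat) : List (List String) :=
  if hi : i < nRows then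
    if pvGetC m i c = "" then
      -- j := pvFindJ m nRows c (i + 1)
      if pvFindJ m nRows c (i + 1) < nRows then
        pvWhile (pvFill m c i (pvFindJ m nRows c (i + 1))) nRows c (pvFindJ m nRows c (i + 1) + 1)
      else pvWhile m nRows c (pvFindJ m nRows c (i + 1) + 1)
    else pvWhile m nRows c (i + 1)
  else m
termination_by nRows - i
decreasing_by
  · have := pvFindJ_ge m nRows c (i + 1); omega
  · have := pvFindJ_ge m nRows c (i + 1); omega
  · omega

def fill_rowspan_cells (body : List (List String)) : List (List String) :=
  if body = [] then body
  else
    let nCols := (body.map List.length).foldl Nat.max 0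
    let result := body.map (fun r => r ++ List.replicate (nCols - r.length) "")
    let nRows := result.length
    (List.range nCols).foldl (fun m col => pvWhile m nRows col 0) result

-- ===== PORT B =====
def fill_rowspan_cells_alt (body : List (List String)) : List (List String) :=
  if body = [] then body
  else
    let nCols := (body.map List.length).foldl Nat.max 0
    let step := fun (st : List String × List (List String)) (r : List String) =>
      let padded := r ++ List.replicate (nCols - r.length) ""
      let filled := List.zipWith (fun cell k => if cell = "" then k else cell) padded st.1
      (filled, st.2 ++ [filled])
    ((body.reverse.foldl step (List.replicate nCols "", [])).2).reverse

-- ===== PRECONDITION & SPEC =====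
def Spec_fill_rowspan_cells (body : List (List String)) (out : List (List String)) : Prop := out = fill_rowspan_cells_alt body
instance (body : List (List String)) (out : List (List String)) : Decidable (Spec_fill_rowspan_cells body out) := by unfold Spec_fill_rowspan_cells; infer_instance

-- ===== CLAIM (what is proved, stated in full; the proofs are below) =====
def Claim_equal_fill_rowspan_cells : Prop := ∀ (body : List (List String)), Dom_fill_rowspan_cells body → Spec_fill_rowspan_cells body (fill_rowspan_cells body)

-- ===== LEMMAS AND PROOFS =====

-- first non-empty value of a column suffix: the common specification of both programs
def pvFirstNE : List String → String
  | [] => ""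
  | x :: xs => if x = "" then pvFirstNE xs else x

def pvSpecEntry (l : List String) (k : Nat) : String := pvFirstNE (l.drop k)

def pvColAt (m : List (List String)) (c : Nat) : List String := m.map (fun r => r.getD c "")

-- pure recursion mirroring B's bottom-up carry
def pvFillRows (nCols : Nat) : List (List String) → List (List String)
  | [] => []
  | r :: rs =>
    let rest := pvFillRows nCols rs
    (List.zipWith (fun cell k => if cell = "" then k else cell)
      (r ++ List.replicate (nCols - r.length) "")
      (rest.headD (List.replicate nCols ""))) :: rest

lemma pvListEqOfGetD {α : Type} (d : α) (l l' : List α) (hlen : l.length = l'.length)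
    (h : ∀ k, l.getD k d = l'.getD k d) : l = l' := by
  apply List.ext_getElem hlen
  intro k h1 h2
  have := h k
  rwa [List.getD_eq_getElem l d h1, List.getD_eq_getElem l' d h2] at this

lemma pvSpecEntry_lt (l : List String) (k : Nat) (hk : k < l.length) :
    pvSpecEntry l k = if l.getD k "" = "" then pvSpecEntry l (k + 1) else l.getD k "" := by
  unfold pvSpecEntry
  rw [← List.getElem_cons_drop hk, List.getD_eq_getElem l "" hk]
  simp [pvFirstNE]

lemma pvSpecEntry_ge (l : List String) (k : Nat) (hk : l.length ≤ k) : pvSpecEntry l k = "" := by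
  unfold pvSpecEntry
  rw [List.drop_eq_nil_of_le hk]
  rfl

lemma pvSpecEntry_congr (l l' : List String) (k : Nat) (hlen : l.length = l'.length)
    (h : ∀ t, k ≤ t → l.getD t "" = l'.getD t "") : pvSpecEntry l k = pvSpecEntry l' k := by
  by_cases hk : k < l.length
  · rw [pvSpecEntry_lt l k hk, pvSpecEntry_lt l' k (hlen ▸ hk),
      h k (Nat.le_refl k),
      pvSpecEntry_congr l l' (k + 1) hlen (fun t ht => h t (by omega))]
  · rw [pvSpecEntry_ge l k (by omega), pvSpecEntry_ge l' k (by omega)]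
termination_by l.length - k

lemma pvSpec_of_block (l : List String) (k j : Nat) (hkj : k ≤ j) (hj : j < l.length)
    (hempty : ∀ t, k ≤ t → t < j → l.getD t "" = "") (hne : l.getD j "" ≠ "") :
    pvSpecEntry l k = l.getD j "" := by
  rcases Nat.eq_or_lt_of_le hkj with heq | hlt
  · subst heq
    rw [pvSpecEntry_lt l k hj, if_neg hne]
  · rw [pvSpecEntry_lt l k (by omega), if_pos (hempty k (Nat.le_refl k) hlt)]
    exact pvSpec_of_block l (k + 1) j (by omega) hj (fun t ht1 ht2 => hempty t (by omega) ht2) hne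
termination_by j - k

lemma pvSpec_of_none (l : List String) (k : Nat)
    (hempty : ∀ t, k ≤ t → t < l.length → l.getD t "" = "") : pvSpecEntry l k = "" := by
  by_cases hk : k < l.length
  · rw [pvSpecEntry_lt l k hk, if_pos (hempty k (Nat.le_refl k) hk)]
    exact pvSpec_of_none l (k + 1) (fun t ht1 ht2 => hempty t (by omega) ht2)
  · exact pvSpecEntry_ge l k (by omega)
termination_by l.length - k

-- ----- pvSetC / pvGetC basics -----
lemma pvRowSet_ne (m : List (List String)) (k : Nat) (x : List String) (i : Nat) (h : i ≠ k) :
    (m.set k x).getD i [] = m.getD i [] := by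
  rw [List.getD_eq_getElem?_getD, List.getD_eq_getElem?_getD, List.getElem?_set_ne (by omega)]

lemma pvRowSet_self (m : List (List String)) (k : Nat) (x : List String) (hk : k < m.length) :
    (m.set k x).getD k [] = x := by
  rw [List.getD_eq_getElem?_getD, List.getElem?_set_self hk]
  rfl

lemma pvEntSet_self (r : List String) (c : Nat) (v : String) (hc : c < r.length) :
    (r.set c v).getD c "" = v := by
  rw [List.getD_eq_getElem?_getD, List.getElem?_set_self hc]
  rfl

lemma pvEntSet_ne (r : List String) (c : Nat) (v : String) (c' : Nat) (h : c' ≠ c) :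
    (r.set c v).getD c' "" = r.getD c' "" := by
  rw [List.getD_eq_getElem?_getD, List.getD_eq_getElem?_getD, List.getElem?_set_ne (by omega)]

lemma pvSetC_length (m : List (List String)) (k c : Nat) (v : String) :
    (pvSetC m k c v).length = m.length := by
  simp [pvSetC]

lemma pvSetC_rowlen (m : List (List String)) (k c : Nat) (v : String) (i : Nat) :
    ((pvSetC m k c v).getD i []).length = (m.getD i []).length := by
  unfold pvSetC
  by_cases hik : i = k
  · subst hik
    by_cases hk : i < m.length
    · rw [pvRowSet_self m i _ hk]
      simp
    · rw [List.set_eq_of_length_le (by omega)]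
  · rw [pvRowSet_ne m k _ i hik]

lemma pvGetC_setC_ne_row (m : List (List String)) (k c : Nat) (v : String) (i c' : Nat)
    (h : i ≠ k) : pvGetC (pvSetC m k c v) i c' = pvGetC m i c' := by
  unfold pvGetC pvSetC
  rw [pvRowSet_ne m k _ i h]

lemma pvGetC_setC_ne_col (m : List (List String)) (k c : Nat) (v : String) (i c' : Nat)
    (h : c' ≠ c) : pvGetC (pvSetC m k c v) i c' = pvGetC m i c' := by
  unfold pvGetC pvSetC
  by_cases hik : i = k
  · subst hik
    by_cases hk : i < m.length
    · rw [pvRowSet_self m i _ hk, pvEntSet_ne _ c v c' h]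
    · rw [List.set_eq_of_length_le (by omega)]
  · rw [pvRowSet_ne m k _ i hik]

lemma pvGetC_setC_self (m : List (List String)) (k c : Nat) (v : String)
    (hk : k < m.length) (hc : c < (m.getD k []).length) :
    pvGetC (pvSetC m k c v) k c = v := by
  unfold pvGetC pvSetC
  rw [pvRowSet_self m k _ hk, pvEntSet_self _ c v hc]

-- ----- pvFindJ full specification -----
lemma pvColAt_length (m : List (List String)) (c : Nat) : (pvColAt m c).length = m.length := by
  simp [pvColAt]

lemma pvColAt_getD (m : List (List String)) (c k : Nat) :
    (pvColAt m c).getD k "" = pvGetC m k c := by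
  unfold pvColAt pvGetC
  rw [List.getD_eq_getElem?_getD, List.getElem?_map, List.getD_eq_getElem?_getD]
  cases h : m[k]? <;> simp [h]

lemma pvPad_getD (r : List String) (n c : Nat) :
    (r ++ List.replicate (n - r.length) "").getD c "" = r.getD c "" := by
  by_cases hc : c < r.length
  · rw [List.getD_eq_getElem?_getD, List.getElem?_append_left hc, ← List.getD_eq_getElem?_getD]
  · rw [List.getD_eq_getElem?_getD, List.getElem?_append_right (by omega), List.getElem?_replicate]
    rw [List.getD_eq_getElem?_getD, List.getElem?_eq_none (by omega)]
    split <;> rfl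

lemma pvFindJ_spec (m : List (List String)) (nRows c : Nat) (j : Nat) :
    (∀ t, j ≤ t → t < pvFindJ m nRows c j → pvGetC m t c = "") ∧
    (pvFindJ m nRows c j < nRows → pvGetC m (pvFindJ m nRows c j) c ≠ "") ∧
    (j ≤ nRows → pvFindJ m nRows c j ≤ nRows) := by
  unfold pvFindJ
  split
  case isTrue h =>
    obtain ⟨h1, h2, h3⟩ := pvFindJ_spec m nRows c (j + 1)
    refine ⟨?_, h2, fun _ => h3 (by omega)⟩
    intro t ht1 ht2
    rcases Nat.eq_or_lt_of_le ht1 with heq | hlt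
    · exact heq ▸ h.2
    · exact h1 t (by omega) ht2
  case isFalse h =>
    exact ⟨fun t ht1 ht2 => absurd ht2 (by omega), fun hj => by tauto, fun hj => hj⟩
termination_by nRows - j
decreasing_by omega

-- ----- pvFill specification -----
lemma pvFill_spec (c : Nat) (n : Nat) : ∀ (i : Nat) (m : List (List String)) (j : Nat), i + n ≤ j →
    i + n ≤ m.length → (∀ k, k < m.length → c < (m.getD k []).length) →
    let L := (List.range' i n).foldl (fun acc k => pvSetC acc k c (pvGetC acc j c)) m
    L.length = m.length ∧
    (∀ k, (L.getD k []).length = (m.getD k []).length) ∧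
    (∀ k c', k < i ∨ i + n ≤ k → pvGetC L k c' = pvGetC m k c') ∧
    (∀ k c', c' ≠ c → pvGetC L k c' = pvGetC m k c') ∧
    (∀ k, i ≤ k → k < i + n → pvGetC L k c = pvGetC m j c) := by
  induction n with
  | zero =>
    intro i m j hj hlen hrow
    exact ⟨rfl, fun k => rfl, fun k c' _ => rfl, fun k c' _ => rfl, fun k h1 h2 => absurd h2 (by omega)⟩
  | succ n ih =>
    intro i m j hj hlen hrow
    rw [List.range'_succ, List.foldl_cons]
    set m1 := pvSetC m i c (pvGetC m j c) with hm1
    have hm1len : m1.length = m.length := pvSetC_length m i c _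
    have hm1row : ∀ k, (m1.getD k []).length = (m.getD k []).length := pvSetC_rowlen m i c _
    obtain ⟨L1, L2, L3, L4, L5⟩ := ih (i + 1) m1 j (by omega) (by omega) (by
      intro k hk
      rw [hm1row k]
      exact hrow k (by omega))
    refine ⟨by rw [L1, hm1len], fun k => by rw [L2 k, hm1row k], ?_, ?_, ?_⟩
    · intro k c' hk
      rw [L3 k c' (by omega), hm1, pvGetC_setC_ne_row m i c _ k c' (by omega)]
    · intro k c' hc'
      rw [L4 k c' hc', hm1, pvGetC_setC_ne_col m i c _ k c' hc']
    · intro k hk1 hk2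
      have hvj : pvGetC m1 j c = pvGetC m j c := pvGetC_setC_ne_row m i c _ j c (by omega)
      rcases Nat.eq_or_lt_of_le hk1 with heq | hlt
      · subst heq
        rw [L3 i c (by omega), hm1]
        exact pvGetC_setC_self m i c _ (by omega) (hrow i (by omega))
      · rw [L5 k (by omega) (by omega), hvj]

-- ----- pvWhile specification -----
lemma pvWhile_spec (nRows c nCols : Nat) (hc : c < nCols) (d : Nat) : ∀ (i : Nat) (m : List (List String)),
    nRows - i ≤ d → m.length = nRows → (∀ k, k < nRows → (m.getD k []).length = nCols) →
    (pvWhile m nRows c i).length = nRows ∧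
    (∀ k, k < nRows → ((pvWhile m nRows c i).getD k []).length = nCols) ∧
    (∀ k c', c' ≠ c → pvGetC (pvWhile m nRows c i) k c' = pvGetC m k c') ∧
    (∀ k, k < i → pvGetC (pvWhile m nRows c i) k c = pvGetC m k c) ∧
    (∀ k, i ≤ k → k < nRows → pvGetC (pvWhile m nRows c i) k c = pvSpecEntry (pvColAt m c) k) := by
  induction d with
  | zero =>
    intro i m hd hlen hrow
    rw [pvWhile, dif_neg (by omega)]
    exact ⟨hlen, hrow, fun _ _ _ => rfl, fun _ _ => rfl, fun k hk1 hk2 => absurd hk2 (by omega)⟩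
  | succ d ih =>
    intro i m hd hlen hrow
    by_cases hi : i < nRows
    case neg =>
      rw [pvWhile, dif_neg hi]
      exact ⟨hlen, hrow, fun _ _ _ => rfl, fun _ _ => rfl, fun k hk1 hk2 => absurd hk2 (by omega)⟩
    case pos =>
      rw [pvWhile, dif_pos hi]
      by_cases hemp : pvGetC m i c = ""
      case neg =>
        rw [if_neg hemp]
        obtain ⟨W1, W2, W3, W4, W5⟩ := ih (i + 1) m (by omega) hlen hrow
        refine ⟨W1, W2, W3, fun k hk => W4 k (by omega), ?_⟩
        intro k hk1 hk2
        rcases Nat.eq_or_lt_of_le hk1 with heq | hlt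
        · subst heq
          rw [W4 i (by omega)]
          rw [pvSpecEntry_lt _ i (by rw [pvColAt_length]; omega), pvColAt_getD, if_neg hemp]
        · exact W5 k (by omega) hk2
      case pos =>
        rw [if_pos hemp]
        obtain ⟨J1, J2, J3⟩ := pvFindJ_spec m nRows c (i + 1)
        have hjge := pvFindJ_ge m nRows c (i + 1)
        set j := pvFindJ m nRows c (i + 1) with hjdef
        by_cases hjlt : j < nRows
        case pos =>
          rw [if_pos hjlt]
          obtain ⟨F1, F2, F3, F4, F5⟩ := pvFill_spec c (j - i) i m j (by omega) (by omega)
            (fun k hk => by rw [hrow k (by omega)]; exact hc)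
          have hPF : (List.range' i (j - i)).foldl (fun acc k => pvSetC acc k c (pvGetC acc j c)) m
              = pvFill m c i j := rfl
          rw [hPF] at F1 F2 F3 F4 F5
          have hij : i + (j - i) = j := by omega
          rw [hij] at F3 F5
          obtain ⟨W1, W2, W3, W4, W5⟩ := ih (j + 1) (pvFill m c i j) (by omega)
            (F1.trans hlen) (fun k hk => by rw [F2 k, hrow k hk])
          have hempties : ∀ t, i ≤ t → t < j → pvGetC m t c = "" := by
            intro t ht1 ht2
            rcases Nat.eq_or_lt_of_le ht1 with heq | hlt
            · exact heq ▸ hemp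
            · exact J1 t (by omega) ht2
          refine ⟨W1, W2, ?_, ?_, ?_⟩
          · intro k c' hc'
            rw [W3 k c' hc', F4 k c' hc']
          · intro k hk
            rw [W4 k (by omega), F3 k c (Or.inl hk)]
          · intro k hk1 hk2
            by_cases hkj : k ≤ j
            · have hval : pvGetC (pvWhile (pvFill m c i j) nRows c (j + 1)) k c = pvGetC m j c := by
                rw [W4 k (by omega)]
                rcases Nat.lt_or_ge k j with hlt | hge
                · exact F5 k hk1 hlt
                · have hkj' : k = j := by omega
                  rw [hkj']
                  exact F3 j c (Or.inr (by omega))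
              rw [hval, ← pvColAt_getD m c j]
              symm
              exact pvSpec_of_block (pvColAt m c) k j hkj (by rw [pvColAt_length]; omega)
                (fun t ht1 ht2 => by rw [pvColAt_getD]; exact hempties t (by omega) ht2)
                (by rw [pvColAt_getD]; exact J2 hjlt)
            · rw [W5 k (by omega) hk2]
              apply pvSpecEntry_congr
              · rw [pvColAt_length, pvColAt_length, F1]
              · intro t ht
                rw [pvColAt_getD, pvColAt_getD, F3 t c (Or.inr (by omega))]
        case neg =>
          rw [if_neg hjlt]
          obtain ⟨W1, W2, W3, W4, W5⟩ := ih (j + 1) m (by omega) hlen hrow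
          have hempties : ∀ t, i ≤ t → t < nRows → pvGetC m t c = "" := by
            intro t ht1 ht2
            rcases Nat.eq_or_lt_of_le ht1 with heq | hlt
            · exact heq ▸ hemp
            · exact J1 t (by omega) (by omega)
          refine ⟨W1, W2, W3, fun k hk => W4 k (by omega), ?_⟩
          intro k hk1 hk2
          rw [W4 k (by omega), hempties k hk1 hk2]
          symm
          apply pvSpec_of_none
          intro t ht1 ht2
          rw [pvColAt_getD]
          rw [pvColAt_length, hlen] at ht2
          exact hempties t (by omega) ht2

-- ----- outer column fold -----
lemma pvCols_spec (nRows : Nat) (cs : Nat) : ∀ (m : List (List String)) (nCols : Nat), cs ≤ nCols →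
    m.length = nRows → (∀ k, k < nRows → (m.getD k []).length = nCols) →
    let M := (List.range cs).foldl (fun m col => pvWhile m nRows col 0) m
    M.length = nRows ∧
    (∀ k, k < nRows → ((M.getD k []).length = nCols)) ∧
    (∀ k c, c < cs → k < nRows → pvGetC M k c = pvSpecEntry (pvColAt m c) k) ∧
    (∀ k c, cs ≤ c → pvGetC M k c = pvGetC m k c) := by
  induction cs with
  | zero =>
    intro m nCols h1 h2 h3
    exact ⟨h2, h3, fun k c hc hk => absurd hc (by omega), fun k c hc => rfl⟩
  | succ cs ih =>
    intro m nCols hcs hlen hrow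
    simp only [List.range_succ, List.foldl_append, List.foldl_cons, List.foldl_nil]
    obtain ⟨I1, I2, I3, I4⟩ := ih m nCols (by omega) hlen hrow
    obtain ⟨W1, W2, W3, W4, W5⟩ := pvWhile_spec nRows cs nCols (by omega) nRows 0
      ((List.range cs).foldl (fun m col => pvWhile m nRows col 0) m) (by omega) I1 I2
    refine ⟨W1, W2, ?_, ?_⟩
    · intro k c hc hk
      rcases Nat.lt_or_ge c cs with h | h
      · rw [W3 k c (by omega), I3 k c h hk]
      · have hceq : c = cs := by omega
        subst hceq
        rw [W5 k (by omega) hk]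
        apply pvSpecEntry_congr
        · rw [pvColAt_length, pvColAt_length, I1, hlen]
        · intro t ht
          rw [pvColAt_getD, pvColAt_getD, I4 t c (Nat.le_refl c)]
    · intro k c hcge
      rw [W3 k c (by omega), I4 k c (by omega)]

-- ----- B-side characterisation -----
lemma pvFillRows_length (n : Nat) (rows : List (List String)) :
    (pvFillRows n rows).length = rows.length := by
  induction rows with
  | nil => rfl
  | cons r rs ih => simp [pvFillRows, ih]

lemma pvFillRows_rowlen (n : Nat) (rows : List (List String))
    (h : ∀ r ∈ rows, r.length ≤ n) :
    ∀ row ∈ pvFillRows n rows, row.length = n := by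
  induction rows with
  | nil => simp [pvFillRows]
  | cons r rs ih =>
    intro row hrow
    simp only [pvFillRows, List.mem_cons] at hrow
    rcases hrow with hrow | hrow
    · subst hrow
      rw [List.length_zipWith]
      have h1 : (r ++ List.replicate (n - r.length) "").length = n := by
        have := h r (List.mem_cons_self)
        simp
        omega
      have h2 : ((pvFillRows n rs).headD (List.replicate n "")).length = n := by
        cases hfr : pvFillRows n rs with
        | nil => simp
        | cons a l =>
          simp only [List.headD_cons]
          exact ih (fun r' hr' => h r' (List.mem_cons_of_mem r hr')) a (hfr ▸ List.mem_cons_self)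
      omega
    · exact ih (fun r' hr' => h r' (List.mem_cons_of_mem r hr')) row hrow

lemma pvFillRows_entry (n : Nat) (rows : List (List String)) (h : ∀ r ∈ rows, r.length ≤ n) :
    ∀ i c, c < n →
      ((pvFillRows n rows).getD i []).getD c "" = pvSpecEntry (pvColAt rows c) i := by
  induction rows with
  | nil =>
    intro i c hc
    simp [pvFillRows, pvColAt, pvSpecEntry, pvFirstNE]
  | cons r rs ih =>
    intro i c hc
    have htail : ∀ r' ∈ rs, r'.length ≤ n := fun r' hr' => h r' (List.mem_cons_of_mem r hr')
    have hcarry : ((pvFillRows n rs).headD (List.replicate n "")).getD c "" = pvSpecEntry (pvColAt rs c) 0 := by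
      cases hfr : pvFillRows n rs with
      | nil =>
        have h0 : rs.length = 0 := by rw [← pvFillRows_length n rs, hfr]; rfl
        have hrs : rs = [] := List.eq_nil_of_length_eq_zero h0
        subst hrs
        simp [pvColAt, pvSpecEntry, pvFirstNE]
      | cons a l =>
        simp only [List.headD_cons]
        have ha : a = (pvFillRows n rs).getD 0 [] := by rw [hfr]; rfl
        rw [ha]
        exact ih htail 0 c hc
    have hRHS : pvSpecEntry (pvColAt (r :: rs) c) 0 =
        if r.getD c "" = "" then pvSpecEntry (pvColAt rs c) 0 else r.getD c "" := by
      simp [pvColAt, pvSpecEntry, pvFirstNE]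
    cases i with
    | zero =>
      have hpl : (r ++ List.replicate (n - r.length) "").length = n := by
        have := h r (List.mem_cons_self)
        simp
        omega
      have hcl : ((pvFillRows n rs).headD (List.replicate n "")).length = n := by
        cases hfr : pvFillRows n rs with
        | nil => simp
        | cons a l =>
          simp only [List.headD_cons]
          exact pvFillRows_rowlen n rs htail a (hfr ▸ List.mem_cons_self)
      show ((List.zipWith (fun cell k => if cell = "" then k else cell)
          (r ++ List.replicate (n - r.length) "")
          ((pvFillRows n rs).headD (List.replicate n ""))).getD c "") = _
      rw [List.getD_eq_getElem _ _ (by rw [List.length_zipWith]; omega), List.getElem_zipWith]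
      rw [← List.getD_eq_getElem _ "" (by omega), ← List.getD_eq_getElem _ "" (by omega)]
      rw [pvPad_getD, hcarry, hRHS]
    | succ i' =>
      show ((pvFillRows n rs).getD i' []).getD c "" = _
      rw [ih htail i' c hc]
      have : pvColAt (r :: rs) c = r.getD c "" :: pvColAt rs c := by simp [pvColAt]
      unfold pvSpecEntry
      rw [this, List.drop_succ_cons]

lemma pvB_fold (n : Nat) (rows : List (List String)) :
    rows.foldr (fun r st =>
      (List.zipWith (fun cell k => if cell = "" then k else cell) (r ++ List.replicate (n - r.length) "") st.1,
       st.2 ++ [List.zipWith (fun cell k => if cell = "" then k else cell) (r ++ List.replicate (n - r.length) "") st.1]))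
      (List.replicate n "", ([] : List (List String)))
    = ((pvFillRows n rows).headD (List.replicate n ""), (pvFillRows n rows).reverse) := by
  induction rows with
  | nil => simp [pvFillRows]
  | cons r rs ih =>
    simp only [List.foldr_cons, ih, pvFillRows]
    cases hfr : pvFillRows n rs <;> simp

lemma pvAlt_eq_fillRows (body : List (List String)) (hne : body ≠ []) :
    fill_rowspan_cells_alt body = pvFillRows ((body.map List.length).foldl Nat.max 0) body := by
  simp only [fill_rowspan_cells_alt, if_neg hne, List.foldl_reverse]
  rw [pvB_fold]
  simp

-- ===== VERDICT (by name: the statement is the Claim_ definition above) =====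
theorem fill_rowspan_cells_spec : Claim_equal_fill_rowspan_cells := by
  intro body _
  unfold Spec_fill_rowspan_cells
  by_cases hb : body = []
  · subst hb
    rfl
  · set n := (body.map List.length).foldl Nat.max 0 with hn
    have hle : ∀ r ∈ body, r.length ≤ n :=
      fun r hr => (PySem.List.le_foldl_max (body.map List.length) 0).2 r.length (List.mem_map_of_mem hr)
    set m0 := body.map (fun r => r ++ List.replicate (n - r.length) "") with hm0
    have hm0len : m0.length = body.length := by simp [hm0]
    have hrowlen : ∀ k, k < m0.length → (m0.getD k []).length = n := by
      intro k hk
      rw [hm0] at hk ⊢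
      rw [List.getD_eq_getElem _ _ hk, List.getElem_map]
      have := hle (body[k]'(by simpa using hk)) (List.getElem_mem _)
      simp
      omega
    have hm0get : ∀ k c, pvGetC m0 k c = pvGetC body k c := by
      intro k c
      unfold pvGetC
      by_cases hk : k < body.length
      · rw [hm0, List.getD_eq_getElem (body.map _) [] (by simpa using hk), List.getElem_map,
          List.getD_eq_getElem body [] hk]
        exact pvPad_getD _ n c
      · rw [List.getD_eq_default m0 [] (by rw [hm0len]; omega), List.getD_eq_default body [] (by omega)]
    have hA : fill_rowspan_cells body = (List.range n).foldl (fun m col => pvWhile m m0.length col 0) m0 := by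
      simp only [fill_rowspan_cells, if_neg hb]
      rfl
    have hB : fill_rowspan_cells_alt body = pvFillRows n body := pvAlt_eq_fillRows body hb
    obtain ⟨A1, A2, A3, A4⟩ := pvCols_spec m0.length n m0 n (Nat.le_refl n) rfl hrowlen
    set M := (List.range n).foldl (fun m col => pvWhile m m0.length col 0) m0 with hM
    rw [hA, hB]
    have hBrow : ∀ k, k < body.length → ((pvFillRows n body).getD k []).length = n := by
      intro k hk
      have hklt : k < (pvFillRows n body).length := by rw [pvFillRows_length]; omega
      rw [List.getD_eq_getElem _ _ hklt]
      exact pvFillRows_rowlen n body hle _ (List.getElem_mem hklt)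
    apply pvListEqOfGetD []
    · rw [A1, pvFillRows_length, hm0len]
    · intro k
      by_cases hk : k < body.length
      · apply pvListEqOfGetD ""
        · rw [A2 k (by omega), hBrow k hk]
        · intro cidx
          by_cases hc : cidx < n
          · have hAe : pvGetC M k cidx = pvSpecEntry (pvColAt m0 cidx) k := A3 k cidx hc (by omega)
            have hBe := pvFillRows_entry n body hle k cidx hc
            rw [show (M.getD k []).getD cidx "" = pvGetC M k cidx from rfl, hAe, hBe]
            apply pvSpecEntry_congr
            · rw [pvColAt_length, pvColAt_length, hm0len]
            · intro t ht
              rw [pvColAt_getD, pvColAt_getD, hm0get t cidx]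
          · rw [List.getD_eq_default _ _ (by rw [A2 k (by omega)]; omega),
              List.getD_eq_default _ _ (by rw [hBrow k hk]; omega)]
      · rw [List.getD_eq_default _ _ (by rw [A1]; omega),
          List.getD_eq_default _ _ (by rw [pvFillRows_length]; omega)]
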